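-- pv_equiv track=rewrite | github.com/Michaelx618/moonlet | ai_shell/edit_match.py | _whitespace_ignored_match
-- ===== SOURCE A (Python) =====
-- from typing import List, Optional, Tuple
--
-- def _whitespace_ignored_match(file_content: str, search_content: str) -> Optional[Tuple[int, int]]:
--     """Match ignoring all whitespace (spaces, tabs, newlines). Maps back to original positions."""
--     stripped_file = "".join(c for c in file_content if not c.isspace())
--     stripped_search = "".join(c for c in search_content if not c.isspace())
--     if not stripped_search:
--         return None
--     idx = stripped_file.find(stripped_search)
--     if idx == -1:
--         return None
--     # Map stripped index back to original: count non-whitespace chars to get start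
--     orig_start = -1
--     non_ws = 0
--     for i, c in enumerate(file_content):
--         if not c.isspace():
--             if non_ws == idx:
--                 orig_start = i
--                 break
--             non_ws += 1
--     if orig_start == -1:
--         return None
--     # Find end: orig_start + length of search in original (same non-ws count)
--     need = len(stripped_search)
--     non_ws = 0
--     orig_end = orig_start
--     for i in range(orig_start, len(file_content)):
--         if not file_content[i].isspace():
--             non_ws += 1
--             if non_ws == need:
--                 orig_end = i + 1
--                 break
--         orig_end = i + 1
--     return (orig_start, orig_end)
-- ===== SOURCE B (Python) =====
-- def _whitespace_ignored_match(file_content, search_content):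
--     """Match ignoring all whitespace, via a position table built in one pass."""
--     stripped_chars = []
--     positions = []
--     for i, c in enumerate(file_content):
--         if not c.isspace():
--             stripped_chars.append(c)
--             positions.append(i)
--     stripped_search = "".join(c for c in search_content if not c.isspace())
--     if not stripped_search:
--         return None
--     idx = "".join(stripped_chars).find(stripped_search)
--     if idx == -1:
--         return None
--     return (positions[idx], positions[idx + len(stripped_search) - 1] + 1)
-- ===== Notes on version B (the rewrite author's own statement) =====
-- stated objective: alternative
-- what changed: Instead of re-scanning file_content twice to map the stripped match index back to original start and end positions, B builds a rank-to-original-position table in the same single stripping pass and answers both endpoints by direct table lookups.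
import Mathlib
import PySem

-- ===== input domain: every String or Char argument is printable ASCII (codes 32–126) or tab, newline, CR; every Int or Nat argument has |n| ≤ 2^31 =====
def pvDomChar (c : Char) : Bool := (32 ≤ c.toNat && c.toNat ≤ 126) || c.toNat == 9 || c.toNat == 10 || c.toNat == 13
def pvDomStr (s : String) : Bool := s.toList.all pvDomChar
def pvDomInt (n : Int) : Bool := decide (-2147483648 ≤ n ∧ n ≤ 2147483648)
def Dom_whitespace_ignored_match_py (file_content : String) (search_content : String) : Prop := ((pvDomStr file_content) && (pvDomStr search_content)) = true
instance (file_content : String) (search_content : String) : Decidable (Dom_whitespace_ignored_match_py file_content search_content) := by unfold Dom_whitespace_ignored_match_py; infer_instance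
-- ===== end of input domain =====

-- B replaces A's two mapping re-scans of file_content by a rank→position table built in the single stripping pass (alternative decomposition, same asymptotic cost).

-- ===== PORT A =====
-- "".join(c for c in s if not c.isspace())
def wsStrip (s : List Char) : List Char := s.filter (fun c => !PySem.Chars.isspace c)

-- first mapping loop of A: for i, c in enumerate(file_content): …
def wsFindStart : List Char → Int → Int → Int → Int
  | [], _, _, _ => -1
  | c :: rest, i, nonws, idx =>
    if !PySem.Chars.isspace c then
      (if nonws == idx then i else wsFindStart rest (i+1) (nonws+1) idx)
    else wsFindStart rest (i+1) nonws idx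

-- second mapping loop of A: for i in range(orig_start, len(file_content)): …
def wsFindEnd : List Char → Int → Int → Int → Int → Int
  | [], _, _, _, oe => oe
  | c :: rest, i, nonws, need, _oe =>
    if !PySem.Chars.isspace c then
      (if nonws + 1 == need then i + 1 else wsFindEnd rest (i+1) (nonws+1) need (i+1))
    else wsFindEnd rest (i+1) nonws need (i+1)

def whitespace_ignored_match_py (file_content : String) (search_content : String) : Option (Int × Int) :=
  let fl := file_content.toList
  let stripped_file := wsStrip fl
  let stripped_search := wsStrip search_content.toList
  if stripped_search.isEmpty then none
  else
    let idx := PySem.Chars.find stripped_file stripped_search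
    if idx == -1 then none
    else
      let orig_start := wsFindStart fl 0 0 idx
      if orig_start == -1 then none
      else
        let need : Int := stripped_search.length
        let orig_end := wsFindEnd (fl.drop orig_start.toNat) orig_start 0 need orig_start
        some (orig_start, orig_end)

-- ===== PORT B =====
-- B's single pass: stripped characters together with each one's original index
def wsIndex : List Char → Int → List Char × List Int
  | [], _ => ([], [])
  | c :: rest, i =>
    let sp := wsIndex rest (i+1)
    if PySem.Chars.isspace c then sp else (c :: sp.1, i :: sp.2)

def whitespace_ignored_match_py_alt (file_content : String) (search_content : String) : Option (Int × Int) :=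
  let sp := wsIndex file_content.toList 0
  let stripped_search := wsStrip search_content.toList
  if stripped_search.isEmpty then none
  else
    let idx := PySem.Chars.find sp.1 stripped_search
    if idx == -1 then none
    else
      -- positions[idx] and positions[idx + len(stripped_search) - 1]: always in range when find succeeded
      match PySem.List.pyGet? sp.2 idx, PySem.List.pyGet? sp.2 (idx + stripped_search.length - 1) with
      | some s, some e => some (s, e + 1)
      | _, _ => none

-- ===== PRECONDITION & SPEC =====
def Spec_whitespace_ignored_match_py (file_content : String) (search_content : String) (out : Option (Int × Int)) : Prop := out = whitespace_ignored_match_py_alt file_content search_content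
instance (file_content : String) (search_content : String) (out : Option (Int × Int)) : Decidable (Spec_whitespace_ignored_match_py file_content search_content out) := by unfold Spec_whitespace_ignored_match_py; infer_instance

-- ===== CLAIM (what is proved, stated in full; the proofs are below) =====
def Claim_equal_whitespace_ignored_match_py : Prop := ∀ (file_content : String) (search_content : String), Dom_whitespace_ignored_match_py file_content search_content → Spec_whitespace_ignored_match_py file_content search_content (whitespace_ignored_match_py file_content search_content)

-- ===== LEMMAS AND PROOFS =====

-- proof-side characterisation: the original indices of the non-whitespace characters
def wsPos : List Char → Int → List Int
  | [], _ => []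
  | c :: rest, i => if PySem.Chars.isspace c then wsPos rest (i+1) else i :: wsPos rest (i+1)

theorem wsIndex_eq (l : List Char) (i : Int) : wsIndex l i = (wsStrip l, wsPos l i) := by
  induction l generalizing i with
  | nil => rfl
  | cons c rest ih =>
    simp only [wsIndex, wsStrip, wsPos, List.filter_cons, ih]
    by_cases h : PySem.Chars.isspace c <;> simp [h, wsStrip]

theorem wsPos_length (l : List Char) (i : Int) : (wsPos l i).length = (wsStrip l).length := by
  induction l generalizing i with
  | nil => rfl
  | cons c rest ih =>
    simp only [wsPos, wsStrip, List.filter_cons]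
    by_cases h : PySem.Chars.isspace c <;> simp [h, ih, wsStrip]

theorem wsPos_sorted_ge (l : List Char) (i : Int) :
    (wsPos l i).Pairwise (· < ·) ∧ ∀ x ∈ wsPos l i, i ≤ x := by
  induction l generalizing i with
  | nil => simp [wsPos]
  | cons c rest ih =>
    rcases ih (i+1) with ⟨hp, hge⟩
    by_cases h : PySem.Chars.isspace c
    · simp only [wsPos, h, if_pos]
      exact ⟨hp, fun x hx => le_trans (by omega) (hge x hx)⟩
    · simp only [wsPos, h, Bool.false_eq_true, if_neg, not_false_iff]
      constructor
      · exact List.Pairwise.cons (fun x hx => by have := hge x hx; omega) hp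
      · intro x hx
        rcases List.mem_cons.mp hx with rfl | hx
        · omega
        · have := hge x hx; omega

theorem wsFindStart_eq (l : List Char) (i nonws idx : Int) (h : nonws ≤ idx) :
    wsFindStart l i nonws idx = (wsPos l i).getD (idx - nonws).toNat (-1) := by
  induction l generalizing i nonws with
  | nil => simp [wsFindStart, wsPos]
  | cons c rest ih =>
    by_cases hs : PySem.Chars.isspace c
    · simp only [wsFindStart, hs, Bool.not_true, Bool.false_eq_true, if_neg, not_false_iff, wsPos,
        if_pos]
      exact ih (i+1) nonws h
    · simp only [wsFindStart, hs, Bool.not_false, if_pos, wsPos, Bool.false_eq_true, if_neg,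
        not_false_iff]
      by_cases he : nonws = idx
      · subst he
        simp [List.getD]
      · have hne : (nonws == idx) = false := by simp [he]
        rw [hne]
        simp only [Bool.false_eq_true, if_neg, not_false_iff]
        rw [ih (i+1) (nonws+1) (by omega)]
        have hidx : (idx - nonws).toNat = (idx - (nonws+1)).toNat + 1 := by omega
        rw [hidx]
        simp [List.getD]

theorem wsFindEnd_eq (l : List Char) (i nonws need oe : Int) (h : nonws < need)
    (hlen : (need - nonws).toNat ≤ (wsPos l i).length) :
    wsFindEnd l i nonws need oe = (wsPos l i).getD ((need - nonws).toNat - 1) 0 + 1 := by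
  induction l generalizing i nonws oe with
  | nil => simp only [wsPos, List.length_nil] at hlen; omega
  | cons c rest ih =>
    by_cases hs : PySem.Chars.isspace c
    · simp only [wsPos, hs, if_pos] at hlen ⊢
      simp only [wsFindEnd, hs, Bool.not_true, Bool.false_eq_true, if_neg, not_false_iff]
      exact ih (i+1) nonws (i+1) h hlen
    · simp only [wsPos, hs, Bool.false_eq_true, if_neg, not_false_iff, List.length_cons] at hlen ⊢
      simp only [wsFindEnd, hs, Bool.not_false, if_pos]
      by_cases he : nonws + 1 = need
      · have h1 : (need - nonws).toNat = 1 := by omega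
        simp [he, h1, List.getD]
      · have hne : (nonws + 1 == need) = false := by simp [he]
        rw [hne]
        simp only [Bool.false_eq_true, if_neg, not_false_iff]
        rw [ih (i+1) (nonws+1) (i+1) (by omega) (by omega)]
        have h1 : (need - nonws).toNat - 1 = ((need - (nonws+1)).toNat - 1) + 1 := by omega
        rw [h1]
        simp [List.getD]

theorem wsPos_drop (l : List Char) (i : Int) (m : Nat) :
    wsPos (l.drop m) (i + m) = (wsPos l i).dropWhile (fun x => decide (x < i + m)) := by
  induction l generalizing i m with
  | nil => simp [wsPos]
  | cons c rest ih =>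
    cases m with
    | zero =>
      simp only [List.drop_zero, Nat.cast_zero, add_zero]
      cases hwp : wsPos (c :: rest) i with
      | nil => simp
      | cons a t =>
        rw [List.dropWhile_cons]
        have ha : i ≤ a := (wsPos_sorted_ge (c :: rest) i).2 a (by rw [hwp]; simp)
        have hd : decide (a < i) = false := by simp; omega
        rw [hd]
        simp
    | succ m' =>
      have hL : (c :: rest).drop (m' + 1) = rest.drop m' := rfl
      rw [hL]
      have hc : i + ((m' + 1 : Nat) : Int) = (i + 1) + (m' : Int) := by push_cast; ring
      rw [hc, ih (i+1) m']
      by_cases hs : PySem.Chars.isspace c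
      · simp only [wsPos, hs, if_pos]
      · simp only [wsPos, hs, Bool.false_eq_true, if_neg, not_false_iff]
        rw [List.dropWhile_cons]
        have hd : decide (i < i + 1 + (m' : Int)) = true := by simp; omega
        rw [hd]
        simp

theorem sorted_dropWhile_getElem (p : List Int) (hp : p.Pairwise (· < ·)) (k : Nat)
    (hk : k < p.length) :
    p.dropWhile (fun x => decide (x < p[k])) = p.drop k := by
  induction p generalizing k with
  | nil => simp at hk
  | cons a t ih =>
    cases k with
    | zero =>
      rw [List.dropWhile_cons]
      simp
    | succ k' =>
      have hk' : k' < t.length := by simpa using hk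
      have hgk : (a :: t)[k' + 1] = t[k'] := rfl
      rw [hgk, List.dropWhile_cons]
      have ha : a < t[k'] := (List.pairwise_cons.mp hp).1 _ (List.getElem_mem hk')
      have hd : decide (a < t[k']) = true := by simpa using ha
      rw [hd]
      simp only [if_pos]
      exact ih (List.pairwise_cons.mp hp).2 k' hk'

-- ===== VERDICT (by name: the statement is the Claim_ definition above) =====
theorem whitespace_ignored_match_py_spec : Claim_equal_whitespace_ignored_match_py := by
  intro fc sc _dom
  unfold Spec_whitespace_ignored_match_py
  simp only [whitespace_ignored_match_py, whitespace_ignored_match_py_alt, wsIndex_eq]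
  set fl := fc.toList with hfl
  set ss := wsStrip sc.toList with hss
  by_cases hempty : ss.isEmpty
  · simp [hempty]
  · have hemptyF : ss.isEmpty = false := by simpa using hempty
    have hssne : ss ≠ [] := fun h => hempty (List.isEmpty_iff.mpr h)
    simp only [hemptyF, Bool.false_eq_true, if_false]
    set idx := PySem.Chars.find (wsStrip fl) ss with hidx
    by_cases hneg : idx = -1
    · simp [hneg]
    · have hneF : (idx == -1) = false := by simp [hneg]
      simp only [hneF, Bool.false_eq_true, if_false]
      have hf0 : PySem.Chars.findFrom (wsStrip fl) ss (((0:Nat)):Int) = idx := by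
        rw [show (((0:Nat)):Int) = (0:Int) from by simp, PySem.Chars.findFrom_zero]
      obtain ⟨hge0, hpre, -⟩ := PySem.Chars.findFrom_natCast_spec (wsStrip fl) ss 0 (Nat.zero_le _)
        (by rw [hf0]; exact hneg)
      rw [hf0] at hge0 hpre
      have hgeZ : (0:Int) ≤ idx := by exact_mod_cast hge0
      have hsslen : 0 < ss.length := List.length_pos_of_ne_nil hssne
      have hlen : idx.toNat + ss.length ≤ (wsStrip fl).length := by
        have h1 := hpre.length_le
        rw [List.length_drop] at h1
        omega
      obtain ⟨hpair, hgei⟩ := wsPos_sorted_ge fl 0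
      have hplen : (wsPos fl 0).length = (wsStrip fl).length := wsPos_length fl 0
      have hik : idx.toNat < (wsPos fl 0).length := by omega
      have hik2 : idx.toNat + ss.length - 1 < (wsPos fl 0).length := by omega
      have hstart : wsFindStart fl 0 0 idx = (wsPos fl 0)[idx.toNat] := by
        rw [wsFindStart_eq fl 0 0 idx hgeZ, sub_zero]
        exact List.getD_eq_getElem _ _ hik
      have hs0 : (0:Int) ≤ (wsPos fl 0)[idx.toNat] := hgei _ (List.getElem_mem hik)
      rw [hstart]
      have hsneF : (((wsPos fl 0)[idx.toNat] : Int) == -1) = false := by simp; omega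
      simp only [hsneF, Bool.false_eq_true, if_false]
      have hB1 : PySem.List.pyGet? (wsPos fl 0) idx = some (wsPos fl 0)[idx.toNat] :=
        PySem.List.pyGet?_eq_some_getElem _ hgeZ (by omega)
      have he2 : (idx + (ss.length:Int) - 1).toNat = idx.toNat + ss.length - 1 := by omega
      have hB2 : PySem.List.pyGet? (wsPos fl 0) (idx + (ss.length:Int) - 1)
          = some (wsPos fl 0)[idx.toNat + ss.length - 1] := by
        rw [PySem.List.pyGet?_eq_some_getElem _ (by omega) (by omega)]
        simp only [he2]
      rw [hB1, hB2]
      have hv0 : (0:Int) + ((((wsPos fl 0)[idx.toNat]).toNat : Nat) : Int)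
          = (wsPos fl 0)[idx.toNat] := by omega
      have hdropPos : wsPos (fl.drop ((wsPos fl 0)[idx.toNat]).toNat) ((wsPos fl 0)[idx.toNat])
          = (wsPos fl 0).drop idx.toNat := by
        have h1 := wsPos_drop fl 0 (((wsPos fl 0)[idx.toNat]).toNat)
        rw [hv0] at h1
        rw [h1]
        exact sorted_dropWhile_getElem _ hpair idx.toNat hik
      have hgd : ((wsPos fl 0).drop idx.toNat).getD (ss.length - 1) 0
          = (wsPos fl 0)[idx.toNat + ss.length - 1] := by
        rw [List.getD_eq_getElem?_getD, List.getElem?_drop,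
          show idx.toNat + (ss.length - 1) = idx.toNat + ss.length - 1 from by omega,
          List.getElem?_eq_getElem hik2]
        rfl
      have hend : wsFindEnd (fl.drop ((wsPos fl 0)[idx.toNat]).toNat) ((wsPos fl 0)[idx.toNat]) 0
          ((ss.length : Nat) : Int) ((wsPos fl 0)[idx.toNat])
          = (wsPos fl 0)[idx.toNat + ss.length - 1] + 1 := by
        rw [wsFindEnd_eq _ _ _ _ _ (by omega)
          (by rw [hdropPos, List.length_drop]; omega)]
        rw [hdropPos]
        rw [show (((ss.length : Nat) : Int) - 0).toNat = ss.length from by omega]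
        rw [hgd]
      rw [hend]
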